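-- pv_equiv track=rewrite | github.com/DimaVasiliu/timrx-3d-print | backend/services/pricing_service.py | _is_fal_seedance_variant_code
-- ===== SOURCE A (Python) =====
-- def _is_fal_seedance_variant_code(action_key: str) -> bool:
--     """
--     Check if an action key is a fal Seedance variant code.
--
--     Pattern: fal_seedance_{text_generate|image_animate}_{duration}s
--     """
--     if not action_key.startswith("fal_seedance_"):
--         return False
--
--     valid_prefixes = (
--         "fal_seedance_text_generate_",
--         "fal_seedance_image_animate_",
--         "fal_seedance_image_transition_",
--     )
--     for prefix in valid_prefixes:
--         if action_key.startswith(prefix):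
--             suffix = action_key[len(prefix):]
--             return suffix in {"5s", "10s", "12s"}
--
--     return False
-- ===== SOURCE B (Python) =====
-- VALID_SEEDANCE_CODES = frozenset({
--     "fal_seedance_text_generate_5s",
--     "fal_seedance_text_generate_10s",
--     "fal_seedance_text_generate_12s",
--     "fal_seedance_image_animate_5s",
--     "fal_seedance_image_animate_10s",
--     "fal_seedance_image_animate_12s",
--     "fal_seedance_image_transition_5s",
--     "fal_seedance_image_transition_10s",
--     "fal_seedance_image_transition_12s",
-- })
--
--
-- def _is_fal_seedance_variant_code(action_key: str) -> bool:
--     return action_key in VALID_SEEDANCE_CODES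
-- ===== Notes on version B (the rewrite author's own statement) =====
-- stated objective: simpler
-- what changed: Replaced the startswith guard, prefix loop and suffix slicing with a single full-string membership test against a precomputed frozenset of the 9 valid codes.
import Mathlib
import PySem

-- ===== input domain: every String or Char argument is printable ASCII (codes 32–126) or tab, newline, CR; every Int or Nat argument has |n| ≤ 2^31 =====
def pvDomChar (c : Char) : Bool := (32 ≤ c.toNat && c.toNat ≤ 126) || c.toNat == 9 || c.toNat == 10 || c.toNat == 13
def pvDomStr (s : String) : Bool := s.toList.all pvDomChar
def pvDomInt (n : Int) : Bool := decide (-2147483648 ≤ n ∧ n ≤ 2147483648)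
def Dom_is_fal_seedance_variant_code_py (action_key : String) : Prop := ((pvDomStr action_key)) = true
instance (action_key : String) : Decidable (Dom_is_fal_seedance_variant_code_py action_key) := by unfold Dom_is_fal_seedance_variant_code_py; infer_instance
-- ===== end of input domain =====

-- B replaces A's startswith guard, prefix loop and suffix slicing by one membership test
-- against the precomputed set of all 9 valid codes (objective: simpler).

-- ===== PORT A =====
-- the set literal {"5s", "10s", "12s"}
def pvSeedanceDurations : PySem.Set String := PySem.Set.ofList ["5s", "10s", "12s"]

-- the 'for prefix in valid_prefixes' loop: first matching prefix returns, else fall through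
def pvSeedanceLoop (action_key : String) : List String → Bool
  | [] => false
  | p :: rest =>
    if PySem.Str.startswith action_key p then
      decide (PySem.Str.slice action_key (some (PySem.Str.len p)) none ∈ pvSeedanceDurations)
    else pvSeedanceLoop action_key rest

def is_fal_seedance_variant_code_py (action_key : String) : Bool :=
  if !PySem.Str.startswith action_key "fal_seedance_" then false
  else
    pvSeedanceLoop action_key
      ["fal_seedance_text_generate_", "fal_seedance_image_animate_",
       "fal_seedance_image_transition_"]

-- ===== PORT B =====
-- the module-level frozenset VALID_SEEDANCE_CODES
def pvValidSeedanceCodes : PySem.Set String :=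
  PySem.Set.ofList
    ["fal_seedance_text_generate_5s", "fal_seedance_text_generate_10s",
     "fal_seedance_text_generate_12s", "fal_seedance_image_animate_5s",
     "fal_seedance_image_animate_10s", "fal_seedance_image_animate_12s",
     "fal_seedance_image_transition_5s", "fal_seedance_image_transition_10s",
     "fal_seedance_image_transition_12s"]

def is_fal_seedance_variant_code_py_alt (action_key : String) : Bool :=
  decide (action_key ∈ pvValidSeedanceCodes)

-- ===== PRECONDITION & SPEC =====
def Spec_is_fal_seedance_variant_code_py (action_key : String) (out : Bool) : Prop := out = is_fal_seedance_variant_code_py_alt action_key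
instance (action_key : String) (out : Bool) : Decidable (Spec_is_fal_seedance_variant_code_py action_key out) := by unfold Spec_is_fal_seedance_variant_code_py; infer_instance

-- ===== CLAIM (what is proved, stated in full; the proofs are below) =====
def Claim_equal_is_fal_seedance_variant_code_py : Prop := ∀ (action_key : String), Dom_is_fal_seedance_variant_code_py action_key → Spec_is_fal_seedance_variant_code_py action_key (is_fal_seedance_variant_code_py action_key)

-- ===== LEMMAS AND PROOFS =====

-- if p is a prefix of s and s[len(p):] = d then s is literally p ++ d (on char lists)
lemma pvSliceDecomp (s p d : String) (h : p.toList <+: s.toList)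
    (hs : PySem.Str.slice s (some (PySem.Str.len p)) none = d) :
    s.toList = p.toList ++ d.toList := by
  obtain ⟨t, ht⟩ := h
  have h1 : (PySem.Str.slice s (some (PySem.Str.len p)) none).toList = t := by
    simp [PySem.Str.toList_slice, PySem.Str.len]
    rw [← ht]
    simp
  rw [hs] at h1
  rw [← ht, h1]

lemma pvMemOf (s c : String) (h : s.toList = c.toList) (hc : c ∈ pvValidSeedanceCodes) :
    s ∈ pvValidSeedanceCodes := by
  rw [String.toList_inj.mp h]; exact hc

-- a successful prefix branch of A's loop puts s among the nine codes
lemma pvStep (s p c5 c10 c12 : String)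
    (m5 : c5 ∈ pvValidSeedanceCodes) (m10 : c10 ∈ pvValidSeedanceCodes)
    (m12 : c12 ∈ pvValidSeedanceCodes)
    (e5 : p.toList ++ "5s".toList = c5.toList)
    (e10 : p.toList ++ "10s".toList = c10.toList)
    (e12 : p.toList ++ "12s".toList = c12.toList)
    (hp : PySem.Str.startswith s p = true)
    (hd : decide (PySem.Str.slice s (some (PySem.Str.len p)) none ∈ pvSeedanceDurations) = true) :
    s ∈ pvValidSeedanceCodes := by
  have hpre : p.toList <+: s.toList := by
    rw [PySem.Str.startswith_eq] at hp
    exact (PySem.Chars.startswith_iff _ _).mp hp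
  have hd' := of_decide_eq_true hd
  simp only [pvSeedanceDurations, PySem.Set.mem_ofList, List.mem_cons,
    List.not_mem_nil, or_false] at hd'
  rcases hd' with hd' | hd' | hd'
  · exact pvMemOf s c5 (by rw [pvSliceDecomp s p _ hpre hd', e5]) m5
  · exact pvMemOf s c10 (by rw [pvSliceDecomp s p _ hpre hd', e10]) m10
  · exact pvMemOf s c12 (by rw [pvSliceDecomp s p _ hpre hd', e12]) m12

-- if A returns True on s, then s is one of the nine valid codes
lemma pvA_true_mem (s : String) (hA : is_fal_seedance_variant_code_py s = true) :
    s ∈ pvValidSeedanceCodes := by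
  unfold is_fal_seedance_variant_code_py at hA
  by_cases h0 : PySem.Str.startswith s "fal_seedance_" = true
  · rw [h0] at hA
    simp only [Bool.not_true, Bool.false_eq_true, if_false, pvSeedanceLoop] at hA
    split_ifs at hA with h1 h2 h3
    · exact pvStep s _ "fal_seedance_text_generate_5s" "fal_seedance_text_generate_10s"
        "fal_seedance_text_generate_12s" (by decide) (by decide) (by decide)
        (by decide) (by decide) (by decide) h1 hA
    · exact pvStep s _ "fal_seedance_image_animate_5s" "fal_seedance_image_animate_10s"
        "fal_seedance_image_animate_12s" (by decide) (by decide) (by decide)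
        (by decide) (by decide) (by decide) h2 hA
    · exact pvStep s _ "fal_seedance_image_transition_5s" "fal_seedance_image_transition_10s"
        "fal_seedance_image_transition_12s" (by decide) (by decide) (by decide)
        (by decide) (by decide) (by decide) h3 hA
  · rw [Bool.not_eq_true] at h0
    rw [h0] at hA
    exact absurd hA (by simp)

lemma pvMain (s : String) :
    is_fal_seedance_variant_code_py s = is_fal_seedance_variant_code_py_alt s := by
  by_cases hB : s ∈ pvValidSeedanceCodes
  · have hBtrue : is_fal_seedance_variant_code_py_alt s = true := by
      unfold is_fal_seedance_variant_code_py_alt; exact decide_eq_true hB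
    have : is_fal_seedance_variant_code_py s = true := by
      simp only [pvValidSeedanceCodes, PySem.Set.mem_ofList] at hB
      fin_cases hB <;> decide
    rw [this, hBtrue]
  · have hBfalse : is_fal_seedance_variant_code_py_alt s = false := by
      unfold is_fal_seedance_variant_code_py_alt; exact decide_eq_false hB
    have hAfalse : is_fal_seedance_variant_code_py s = false := by
      by_contra h
      exact hB (pvA_true_mem s (by revert h; cases is_fal_seedance_variant_code_py s <;> simp))
    rw [hAfalse, hBfalse]

-- ===== VERDICT (by name: the statement is the Claim_ definition above) =====
theorem is_fal_seedance_variant_code_py_spec : Claim_equal_is_fal_seedance_variant_code_py := by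
  intro s _
  unfold Spec_is_fal_seedance_variant_code_py
  exact pvMain s
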